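-- pv_equiv track=rewrite | github.com/minhthe/minhthe.007-gmail.com | Codility/99_Challeges/00_grab_ticket_55.py | solution
-- ===== SOURCE A (Python) =====
-- def solution(A):
--     # write your code in Python 3.6
--     pass
--     n = len(A)
--     rst = []
--     mp = {}
--     def f():
--         cnt = 0
--         for i in range(0, n-2):
--             for j in range(i+1, n-1):
--                 for k in range(j+1,n):
--                     tmp = [A[i], A[j], A[k]]
--                     if tuple(tmp) not in mp :
--                         cnt +=1
--                         mp[tuple(tmp)] = True
--         return cnt
--     return f()
-- ===== SOURCE B (Python) =====
-- def solution(A):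
--     # One left-to-right pass maintaining the sets of distinct length-1/2/3
--     # value-subsequences seen so far; answer is the size of the triple set.
--     seen1 = set()
--     seen2 = set()
--     seen3 = set()
--     for x in A:
--         seen3.update((a, b, x) for (a, b) in seen2)
--         seen2.update((a, x) for a in seen1)
--         seen1.add(x)
--     return len(seen3)
-- ===== Notes on version B (the rewrite author's own statement) =====
-- stated objective: alternative
-- what changed: Replaces the O(n^3) triple index loop with dict dedup by a single left-to-right pass that incrementally maintains the sets of distinct length-1, length-2 and length-3 value-subsequences, returning the size of the triple set.
import Mathlib
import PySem

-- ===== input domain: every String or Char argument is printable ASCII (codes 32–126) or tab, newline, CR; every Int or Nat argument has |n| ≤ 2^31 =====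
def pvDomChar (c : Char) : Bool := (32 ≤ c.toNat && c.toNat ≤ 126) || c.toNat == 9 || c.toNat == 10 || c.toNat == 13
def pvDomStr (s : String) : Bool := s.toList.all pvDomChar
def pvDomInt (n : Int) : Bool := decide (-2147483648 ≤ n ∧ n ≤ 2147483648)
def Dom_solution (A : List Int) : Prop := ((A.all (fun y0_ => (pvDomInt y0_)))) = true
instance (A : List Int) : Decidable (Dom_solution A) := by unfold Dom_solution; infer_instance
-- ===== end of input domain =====

-- B replaces A's O(n^3) triple index loop + dict dedup by one left-to-right pass
-- maintaining the sets of distinct length-1/2/3 value-subsequences (alternative algorithm).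

-- ===== PORT A =====
-- triple loop over index ranges; indices are always in range, ported with pyGetD
def solution (A : List Int) : Int :=
  let n : Int := A.length
  let s :=
    (PySem.List.pyRange 0 (n - 2) 1).foldl (fun s i =>
      (PySem.List.pyRange (i + 1) (n - 1) 1).foldl (fun s j =>
        (PySem.List.pyRange (j + 1) n 1).foldl (fun s k =>
          let tmp : Int × Int × Int :=
            (PySem.List.pyGetD A i 0, PySem.List.pyGetD A j 0, PySem.List.pyGetD A k 0)
          if s.2.contains tmp = false then (s.1 + 1, s.2.insert tmp true) else s)
          s) s)
      ((0 : Int), (PySem.Dict.empty : PySem.Dict (Int × Int × Int) Bool))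
  s.1

-- ===== PORT B =====
def solution_alt (A : List Int) : Int :=
  let s := A.foldl
    (fun (s : PySem.Set Int × PySem.Set (Int × Int) × PySem.Set (Int × Int × Int)) x =>
      let p3 := s.2.1.foldl (fun t ab => PySem.Set.add t (ab.1, ab.2, x)) s.2.2
      let p2 := s.1.foldl (fun t a => PySem.Set.add t (a, x)) s.2.1
      (PySem.Set.add s.1 x, p2, p3))
    (PySem.Set.empty, PySem.Set.empty, PySem.Set.empty)
  PySem.Set.len s.2.2

-- ===== PRECONDITION & SPEC =====
def Spec_solution (A : List Int) (out : Int) : Prop := out = solution_alt A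
instance (A : List Int) (out : Int) : Decidable (Spec_solution A out) := by unfold Spec_solution; infer_instance

-- ===== CLAIM (what is proved, stated in full; the proofs are below) =====
def Claim_equal_solution : Prop := ∀ (A : List Int), Dom_solution A → Spec_solution A (solution A)

-- ===== LEMMAS AND PROOFS =====

-- (a, b) is a value-pair of a length-2 subsequence of l
def pvPair (l : List Int) (p : Int × Int) : Prop :=
  ∃ i j : Nat, i < j ∧ j < l.length ∧ p = (l.getD i 0, l.getD j 0)

-- t is a value-triple of a length-3 subsequence of l
def pvTrip (l : List Int) (t : Int × Int × Int) : Prop :=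
  ∃ i j k : Nat, i < j ∧ j < k ∧ k < l.length ∧ t = (l.getD i 0, l.getD j 0, l.getD k 0)

-- the flat list of triples A's nested loops enumerate, in order
def pvLtrips (A : List Int) : List (Int × Int × Int) :=
  (PySem.List.pyRange 0 ((A.length : Int) - 2) 1).flatMap (fun i =>
    (PySem.List.pyRange (i + 1) ((A.length : Int) - 1) 1).flatMap (fun j =>
      (PySem.List.pyRange (j + 1) (A.length : Int) 1).map (fun k =>
        (PySem.List.pyGetD A i 0, PySem.List.pyGetD A j 0, PySem.List.pyGetD A k 0))))

-- A's loop body as a step over a single enumerated triple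
def pvStepA (s : Int × PySem.Dict (Int × Int × Int) Bool) (t : Int × Int × Int) :
    Int × PySem.Dict (Int × Int × Int) Bool :=
  if s.2.contains t = false then (s.1 + 1, s.2.insert t true) else s

lemma pv_mem_iff_getD (l : List Int) (v : Int) :
    v ∈ l ↔ ∃ i : Nat, i < l.length ∧ v = l.getD i 0 := by
  rw [List.mem_iff_getElem]
  constructor
  · rintro ⟨i, hi, h⟩; exact ⟨i, hi, by rw [List.getD_eq_getElem l 0 hi]; exact h.symm⟩
  · rintro ⟨i, hi, h⟩; exact ⟨i, hi, by rw [← List.getD_eq_getElem l 0 hi]; exact h.symm⟩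

lemma pvPair_append (l : List Int) (x : Int) (p : Int × Int) :
    pvPair (l ++ [x]) p ↔ pvPair l p ∨ ∃ a ∈ l, p = (a, x) := by
  unfold pvPair
  constructor
  · rintro ⟨i, j, hij, hj, rfl⟩
    simp only [List.length_append, List.length_cons, List.length_nil] at hj
    by_cases hjl : j < l.length
    · exact Or.inl ⟨i, j, hij, hjl,
        by rw [List.getD_append _ _ _ _ (by omega), List.getD_append _ _ _ _ hjl]⟩
    · have hj' : j = l.length := by omega
      refine Or.inr ⟨l.getD i 0, (pv_mem_iff_getD l _).2 ⟨i, by omega, rfl⟩, ?_⟩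
      rw [List.getD_append _ _ _ _ (by omega), List.getD_append_right _ _ _ _ (by omega)]
      simp [hj']
  · rintro (⟨i, j, hij, hj, rfl⟩ | ⟨a, ha, rfl⟩)
    · exact ⟨i, j, hij, by simp only [List.length_append]; omega,
        by rw [List.getD_append _ _ _ _ (by omega), List.getD_append _ _ _ _ hj]⟩
    · obtain ⟨i, hi, rfl⟩ := (pv_mem_iff_getD l a).1 ha
      exact ⟨i, l.length, hi, by simp,
        by rw [List.getD_append _ _ _ _ hi,
               List.getD_append_right _ _ _ _ (le_refl _)]; simp⟩

lemma pvTrip_append (l : List Int) (x : Int) (t : Int × Int × Int) :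
    pvTrip (l ++ [x]) t ↔ pvTrip l t ∨ ∃ p, pvPair l p ∧ t = (p.1, p.2, x) := by
  unfold pvTrip
  constructor
  · rintro ⟨i, j, k, hij, hjk, hk, rfl⟩
    simp only [List.length_append, List.length_cons, List.length_nil] at hk
    by_cases hkl : k < l.length
    · exact Or.inl ⟨i, j, k, hij, hjk, hkl,
        by rw [List.getD_append _ _ _ _ (by omega), List.getD_append _ _ _ _ (by omega),
               List.getD_append _ _ _ _ hkl]⟩
    · have hk' : k = l.length := by omega
      refine Or.inr ⟨(l.getD i 0, l.getD j 0), ⟨i, j, hij, by omega, rfl⟩, ?_⟩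
      rw [List.getD_append _ _ _ _ (by omega), List.getD_append _ _ _ _ (by omega),
          List.getD_append_right _ _ _ _ (by omega)]
      simp [hk']
  · rintro (⟨i, j, k, hij, hjk, hk, rfl⟩ | ⟨⟨a, b⟩, ⟨i, j, hij, hj, hp⟩, rfl⟩)
    · exact ⟨i, j, k, hij, hjk, by simp only [List.length_append]; omega,
        by rw [List.getD_append _ _ _ _ (by omega), List.getD_append _ _ _ _ (by omega),
               List.getD_append _ _ _ _ hk]⟩
    · obtain ⟨rfl, rfl⟩ : a = l.getD i 0 ∧ b = l.getD j 0 := by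
        simpa using congrArg (fun q => (q.1, q.2)) hp
      exact ⟨i, j, l.length, hij, hj, by simp,
        by rw [List.getD_append _ _ _ _ (by omega), List.getD_append _ _ _ _ (by omega),
               List.getD_append_right _ _ _ _ (le_refl _)]; simp⟩

-- A-side: the fold of pvStepA keeps cnt = number of keys, keys = Set.update of the enumerated list
lemma pv_foldA (L : List (Int × Int × Int)) :
    ∀ (c : Int) (d : PySem.Dict (Int × Int × Int) Bool), d.keys.Nodup →
      c = (d.keys.length : Int) →
      (L.foldl pvStepA (c, d)).2.keys = PySem.Set.update d.keys L ∧
      (L.foldl pvStepA (c, d)).2.keys.Nodup ∧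
      (L.foldl pvStepA (c, d)).1 = ((L.foldl pvStepA (c, d)).2.keys.length : Int) := by
  induction L with
  | nil => intro c d hnd hc; exact ⟨rfl, hnd, hc⟩
  | cons t L ih =>
    intro c d hnd hc
    simp only [List.foldl_cons]
    have hupd : PySem.Set.update d.keys (t :: L) =
        PySem.Set.update (PySem.Set.add d.keys t) L := rfl
    by_cases hmem : t ∈ d.keys
    · have hcont : d.contains t = true := by
        rw [PySem.Dict.contains_eq_decide_mem_keys]; simpa using hmem
      have hstep : pvStepA (c, d) t = (c, d) := by simp [pvStepA, hcont]
      have hadd : PySem.Set.add d.keys t = d.keys := by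
        simp [PySem.Set.add, PySem.Set.contains, hmem]
      rw [hstep, hupd, hadd]
      exact ih c d hnd hc
    · have hcont : d.contains t = false := by
        rw [PySem.Dict.contains_eq_decide_mem_keys]; simpa using hmem
      have hstep : pvStepA (c, d) t = (c + 1, d.insert t true) := by simp [pvStepA, hcont]
      have hkeys : (d.insert t true).keys = d.keys ++ [t] := by
        simp [PySem.Dict.insert, PySem.Dict.keys, hcont]
      have hadd : PySem.Set.add d.keys t = d.keys ++ [t] := by
        simp [PySem.Set.add, PySem.Set.contains, hmem]
      rw [hstep, hupd, hadd, ← hkeys]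
      exact ih (c + 1) (d.insert t true)
        (by rw [hkeys]; exact List.Nodup.append hnd (List.nodup_singleton t)
              (by simpa using fun h => hmem h))
        (by rw [hkeys]; simp [hc])

-- three nested index loops of A's step = one fold over the flattened enumeration
lemma pv_flat3 (R1 : List Int) (R2 : Int → List Int) (R3 : Int → Int → List Int)
    (g : Int → Int → Int → (Int × Int × Int))
    (s0 : Int × PySem.Dict (Int × Int × Int) Bool) :
    R1.foldl (fun s i => (R2 i).foldl (fun s j =>
        (R3 i j).foldl (fun s k => pvStepA s (g i j k)) s) s) s0 =
    (R1.flatMap (fun i => (R2 i).flatMap (fun j => (R3 i j).map (g i j)))).foldl pvStepA s0 := by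
  rw [List.foldl_flatMap]
  congr 1
  funext s _i
  rw [List.foldl_flatMap]
  congr 1
  funext s j
  rw [List.foldl_map]

-- A's fold IS the flat fold over pvLtrips
lemma pv_solution_flat (A : List Int) :
    solution A = ((pvLtrips A).foldl pvStepA
      ((0 : Int), (PySem.Dict.empty : PySem.Dict (Int × Int × Int) Bool))).1 :=
  congrArg Prod.fst (pv_flat3
    (PySem.List.pyRange 0 ((A.length : Int) - 2) 1)
    (fun i => PySem.List.pyRange (i + 1) ((A.length : Int) - 1) 1)
    (fun _i j => PySem.List.pyRange (j + 1) (A.length : Int) 1)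
    (fun i j k => (PySem.List.pyGetD A i 0, PySem.List.pyGetD A j 0, PySem.List.pyGetD A k 0))
    ((0 : Int), (PySem.Dict.empty : PySem.Dict (Int × Int × Int) Bool)))

lemma pv_mem_Ltrips (A : List Int) (t : Int × Int × Int) :
    t ∈ pvLtrips A ↔ pvTrip A t := by
  unfold pvLtrips pvTrip
  simp only [List.mem_flatMap, List.mem_map, PySem.List.mem_pyRange_one]
  constructor
  · rintro ⟨i, ⟨hi0, hi⟩, j, ⟨hij, hj⟩, k, ⟨hjk, hk⟩, rfl⟩
    refine ⟨i.toNat, j.toNat, k.toNat, by omega, by omega, by omega, ?_⟩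
    rw [PySem.List.pyGetD_eq_getElem A 0 hi0 (by omega),
        PySem.List.pyGetD_eq_getElem A 0 (by omega) (by omega),
        PySem.List.pyGetD_eq_getElem A 0 (by omega) (by omega)]
    rw [List.getD_eq_getElem A 0 (by omega), List.getD_eq_getElem A 0 (by omega),
        List.getD_eq_getElem A 0 (by omega)]
  · rintro ⟨i, j, k, hij, hjk, hk, rfl⟩
    refine ⟨(i : Int), ⟨by omega, by omega⟩,
            (j : Int), ⟨by omega, by omega⟩,
            (k : Int), ⟨by omega, by omega⟩, ?_⟩
    rw [PySem.List.pyGetD_natCast, PySem.List.pyGetD_natCast, PySem.List.pyGetD_natCast]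

-- B's pass as a named fold (proof helper; definitionally solution_alt's fold)
def pvFoldB (l : List Int) :
    PySem.Set Int × PySem.Set (Int × Int) × PySem.Set (Int × Int × Int) :=
  l.foldl
    (fun (s : PySem.Set Int × PySem.Set (Int × Int) × PySem.Set (Int × Int × Int)) x =>
      let p3 := s.2.1.foldl (fun t ab => PySem.Set.add t (ab.1, ab.2, x)) s.2.2
      let p2 := s.1.foldl (fun t a => PySem.Set.add t (a, x)) s.2.1
      (PySem.Set.add s.1 x, p2, p3))
    (PySem.Set.empty, PySem.Set.empty, PySem.Set.empty)

lemma pv_solution_alt_eq (A : List Int) :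
    solution_alt A = PySem.Set.len (pvFoldB A).2.2 := rfl

-- invariant of B's pass: the three components are nodup and characterised by membership
lemma pv_invB (l : List Int) :
    ((pvFoldB l).1.Nodup ∧ ∀ v, v ∈ (pvFoldB l).1 ↔ v ∈ l) ∧
    ((pvFoldB l).2.1.Nodup ∧ ∀ p, p ∈ (pvFoldB l).2.1 ↔ pvPair l p) ∧
    ((pvFoldB l).2.2.Nodup ∧ ∀ t, t ∈ (pvFoldB l).2.2 ↔ pvTrip l t) := by
  induction l using List.reverseRecOn with
  | nil =>
    refine ⟨⟨List.nodup_nil, by simp [pvFoldB, PySem.Set.empty]⟩,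
            ⟨List.nodup_nil, fun p => ?_⟩, ⟨List.nodup_nil, fun t => ?_⟩⟩
    · simp only [pvFoldB, List.foldl_nil, PySem.Set.empty, List.not_mem_nil, false_iff]
      rintro ⟨i, j, _, hj, _⟩; simp at hj
    · simp only [pvFoldB, List.foldl_nil, PySem.Set.empty, List.not_mem_nil, false_iff]
      rintro ⟨i, j, k, _, _, hk, _⟩; simp at hk
  | append_singleton l x ih =>
    obtain ⟨⟨h1n, h1m⟩, ⟨h2n, h2m⟩, ⟨h3n, h3m⟩⟩ := ih
    have hstep : pvFoldB (l ++ [x]) =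
        ((pvFoldB l).1.add x,
         (pvFoldB l).1.foldl (fun t a => PySem.Set.add t (a, x)) (pvFoldB l).2.1,
         (pvFoldB l).2.1.foldl (fun t ab => PySem.Set.add t (ab.1, ab.2, x)) (pvFoldB l).2.2) := by
      unfold pvFoldB
      rw [List.foldl_append]
      rfl
    rw [hstep]
    have e3 : (pvFoldB l).2.1.foldl (fun t ab => PySem.Set.add t (ab.1, ab.2, x)) (pvFoldB l).2.2 =
        PySem.Set.update (pvFoldB l).2.2 ((pvFoldB l).2.1.map (fun ab => (ab.1, ab.2, x))) := by
      show _ = ((pvFoldB l).2.1.map (fun ab => (ab.1, ab.2, x))).foldl PySem.Set.add (pvFoldB l).2.2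
      rw [List.foldl_map]
    have e2 : (pvFoldB l).1.foldl (fun t a => PySem.Set.add t (a, x)) (pvFoldB l).2.1 =
        PySem.Set.update (pvFoldB l).2.1 ((pvFoldB l).1.map (fun a => (a, x))) := by
      show _ = ((pvFoldB l).1.map (fun a => (a, x))).foldl PySem.Set.add (pvFoldB l).2.1
      rw [List.foldl_map]
    refine ⟨⟨PySem.Set.nodup_add _ _ h1n, fun v => ?_⟩,
            ⟨?_, fun p => ?_⟩, ⟨?_, fun t => ?_⟩⟩
    · rw [PySem.Set.mem_add]; simp [h1m]
    · rw [e2]; exact PySem.Set.nodup_update _ _ h2n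
    · rw [e2, PySem.Set.mem_update, pvPair_append, h2m, List.mem_map]
      constructor
      · rintro (h | ⟨a, ha, rfl⟩)
        · exact Or.inl h
        · exact Or.inr ⟨a, (h1m a).1 ha, rfl⟩
      · rintro (h | ⟨a, ha, rfl⟩)
        · exact Or.inl h
        · exact Or.inr ⟨a, (h1m a).2 ha, rfl⟩
    · rw [e3]; exact PySem.Set.nodup_update _ _ h3n
    · rw [e3, PySem.Set.mem_update, pvTrip_append, h3m, List.mem_map]
      constructor
      · rintro (h | ⟨ab, hab, rfl⟩)
        · exact Or.inl h
        · exact Or.inr ⟨ab, (h2m ab).1 hab, rfl⟩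
      · rintro (h | ⟨ab, hab, rfl⟩)
        · exact Or.inl h
        · exact Or.inr ⟨ab, (h2m ab).2 hab, rfl⟩

theorem pv_main (A : List Int) : solution A = solution_alt A := by
  -- A's side: cnt = number of distinct enumerated triples
  obtain ⟨hkeys, hknd, hcnt⟩ :=
    pv_foldA (pvLtrips A) 0 PySem.Dict.empty List.nodup_nil rfl
  have hAval : solution A = ((PySem.Set.ofList (pvLtrips A)).length : Int) := by
    rw [pv_solution_flat, hcnt, hkeys]
    have h : PySem.Set.update (PySem.Dict.empty : PySem.Dict (Int × Int × Int) Bool).keys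
        (pvLtrips A) = PySem.Set.ofList (pvLtrips A) := by
      rw [PySem.Set.ofList_eq_foldl]; rfl
    rw [h]
  -- B's side
  obtain ⟨-, -, h3n, h3m⟩ := pv_invB A
  rw [hAval, pv_solution_alt_eq]
  unfold PySem.Set.len
  congr 1
  refine (List.perm_ext_iff_of_nodup (PySem.Set.nodup_ofList _) h3n).2 (fun t => ?_) |>.length_eq
  rw [PySem.Set.mem_ofList, pv_mem_Ltrips, h3m]

-- ===== VERDICT (by name: the statement is the Claim_ definition above) =====
theorem solution_spec : Claim_equal_solution := by
  intro A _
  unfold Spec_solution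
  exact pv_main A
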